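-- pv_equiv track=rewrite | github.com/AkcayFx/VulnHunter | src/vulnhunter/nuclei/profiles.py | get_tags_for_tech
-- ===== SOURCE A (Python) =====
-- TECH_TAG_MAP: dict[str, list[str]] = {
--     "wordpress": ["wordpress", "wp-plugin"],
--     "joomla": ["joomla"],
--     "drupal": ["drupal"],
--     "apache": ["apache"],
--     "nginx": ["nginx"],
--     "spring": ["spring", "springboot"],
--     "jenkins": ["jenkins"],
--     "gitlab": ["gitlab"],
--     "docker": ["docker"],
--     "kubernetes": ["kubernetes", "k8s"],
--     "aws": ["aws", "amazon"],
--     "graphql": ["graphql"],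
-- }
--
-- def get_tags_for_tech(technologies: list[str]) -> list[str]:
--     """Given a list of discovered technologies, return relevant Nuclei tags."""
--     tags: list[str] = []
--     seen: set[str] = set()
--
--     for tech in technologies:
--         tech_lower = tech.lower().strip()
--         for key, tag_list in TECH_TAG_MAP.items():
--             if key in tech_lower:
--                 for tag in tag_list:
--                     if tag not in seen:
--                         tags.append(tag)
--                         seen.add(tag)
--
--     return tags
-- ===== SOURCE B (Python) =====
-- TECH_TAG_MAP: dict[str, list[str]] = {
--     "wordpress": ["wordpress", "wp-plugin"],
--     "joomla": ["joomla"],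
--     "drupal": ["drupal"],
--     "apache": ["apache"],
--     "nginx": ["nginx"],
--     "spring": ["spring", "springboot"],
--     "jenkins": ["jenkins"],
--     "gitlab": ["gitlab"],
--     "docker": ["docker"],
--     "kubernetes": ["kubernetes", "k8s"],
--     "aws": ["aws", "amazon"],
--     "graphql": ["graphql"],
-- }
--
-- def get_tags_for_tech(technologies: list[str]) -> list[str]:
--     """Given a list of discovered technologies, return relevant Nuclei tags.
--
--     Inverted strategy: instead of scanning the map per technology with a
--     seen-set, compute for every map key the index of the FIRST technology it
--     matches, then emit tag lists bucketed by that first-match index.  Since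
--     every tag belongs to exactly one map entry and each entry fires only at
--     its first match, no deduplication pass is needed at all.
--     """
--     lows = [t.lower().strip() for t in technologies]
--     first: dict[str, int] = {}
--     for key in TECH_TAG_MAP:
--         for i, low in enumerate(lows):
--             if key in low:
--                 first[key] = i
--                 break
--     return [tag
--             for i in range(len(lows))
--             for key, tag_list in TECH_TAG_MAP.items()
--             if first.get(key) == i
--             for tag in tag_list]
-- ===== Notes on version B (the rewrite author's own statement) =====
-- stated objective: alternative
-- what changed: B inverts the computation: instead of A's per-technology scan over the map with an interleaved seen-set dedup, B computes for each map key the index of the first matching technology (inner loop with break), then emits tag lists bucketed by that first-match index -- no seen-set and no dedup pass exist, since each tag belongs to exactly one map entry which fires only at its first match.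
import Mathlib
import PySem

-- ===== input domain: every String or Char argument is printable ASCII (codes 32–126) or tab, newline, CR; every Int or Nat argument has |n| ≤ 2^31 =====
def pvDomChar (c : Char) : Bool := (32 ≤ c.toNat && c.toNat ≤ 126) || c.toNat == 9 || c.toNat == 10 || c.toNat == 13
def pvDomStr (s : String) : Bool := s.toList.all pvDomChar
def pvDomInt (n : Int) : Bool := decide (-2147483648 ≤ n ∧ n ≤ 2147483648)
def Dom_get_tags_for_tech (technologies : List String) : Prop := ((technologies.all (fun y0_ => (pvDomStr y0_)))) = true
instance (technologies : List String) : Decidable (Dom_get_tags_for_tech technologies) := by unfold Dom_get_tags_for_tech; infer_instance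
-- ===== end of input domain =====

-- B inverts the computation: it first finds, for every map key, the index of the FIRST matching
-- technology, then emits tag lists bucketed by that first-match index — no seen-set, no dedup pass.

-- ===== PORT A =====
def techTagMap : List (String × List String) :=
  [("wordpress", ["wordpress", "wp-plugin"]),
   ("joomla", ["joomla"]),
   ("drupal", ["drupal"]),
   ("apache", ["apache"]),
   ("nginx", ["nginx"]),
   ("spring", ["spring", "springboot"]),
   ("jenkins", ["jenkins"]),
   ("gitlab", ["gitlab"]),
   ("docker", ["docker"]),
   ("kubernetes", ["kubernetes", "k8s"]),
   ("aws", ["aws", "amazon"]),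
   ("graphql", ["graphql"])]

def get_tags_for_tech (technologies : List String) : List String :=
  (technologies.foldl
    (fun (st : List String × PySem.Set String) tech =>
      let tech_lower := PySem.Str.strip (PySem.Str.lower tech)
      techTagMap.foldl
        (fun st kv =>
          if PySem.Str.isIn kv.1 tech_lower then
            kv.2.foldl
              (fun st tag =>
                if PySem.Set.contains st.2 tag then st
                else (st.1 ++ [tag], PySem.Set.add st.2 tag))
              st
          else st)
        st)
    ([], PySem.Set.empty)).1

-- ===== PORT B =====
-- inner loop 'for i, low in enumerate(lows): if key in low: first[key] = i; break'
def firstLoop (key : String) : List (Int × String) → PySem.Dict String Int → PySem.Dict String Int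
  | [], d => d
  | (i, low) :: rest, d =>
      if PySem.Str.isIn key low then d.insert key i
      else firstLoop key rest d

def get_tags_for_tech_alt (technologies : List String) : List String :=
  let lows := technologies.map (fun t => PySem.Str.strip (PySem.Str.lower t))
  let first := techTagMap.foldl (fun d kv => firstLoop kv.1 (PySem.List.enumerate lows) d)
    PySem.Dict.empty
  (PySem.List.pyRange 0 (PySem.List.len lows) 1).flatMap (fun i =>
    techTagMap.flatMap (fun kv => if first.get? kv.1 = some i then kv.2 else []))

-- ===== PRECONDITION & SPEC =====
def Spec_get_tags_for_tech (technologies : List String) (out : List String) : Prop := out = get_tags_for_tech_alt technologies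
instance (technologies : List String) (out : List String) : Decidable (Spec_get_tags_for_tech technologies out) := by unfold Spec_get_tags_for_tech; infer_instance

-- ===== CLAIM (what is proved, stated in full; the proofs are below) =====
def Claim_equal_get_tags_for_tech : Prop := ∀ (technologies : List String), Dom_get_tags_for_tech technologies → Spec_get_tags_for_tech technologies (get_tags_for_tech technologies)

-- ===== LEMMAS AND PROOFS =====

-- the per-tag accumulation step of A's innermost loop
def pvStep (st : List String × PySem.Set String) (tag : String) : List String × PySem.Set String :=
  if PySem.Set.contains st.2 tag then st else (st.1 ++ [tag], PySem.Set.add st.2 tag)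

-- ordered first-occurrence dedup relative to an already-seen set
def pvDGo (seen : PySem.Set String) : List String → List String
  | [] => []
  | x :: xs => if PySem.Set.contains seen x then pvDGo seen xs
               else x :: pvDGo (PySem.Set.add seen x) xs

-- candidate tags contributed by ONE technology (A's inner double loop, flattened)
def pvM0 (m : List (String × List String)) (low : String) : List String :=
  m.flatMap (fun kv => if PySem.Str.isIn kv.1 low then kv.2 else [])

-- none of the entry's tags has been seen yet
abbrev pvLive (seen : PySem.Set String) (kv : String × List String) : Prop := ∀ t ∈ kv.2, t ∉ seen

-- every entry is either fully seen or fully unseen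
def pvUniform (seen : PySem.Set String) (m : List (String × List String)) : Prop :=
  ∀ kv ∈ m, (∀ t ∈ kv.2, t ∈ seen) ∨ pvLive seen kv

abbrev pvFlatNodup (m : List (String × List String)) : Prop :=
  (m.flatMap (fun kv => kv.2)).Nodup

-- index of the first technology a key matches
def pvIdx (lows : List String) (key : String) : Option Nat :=
  lows.findIdx? (fun low => PySem.Str.isIn key low)

-- B's bucketed output, relativised to a seen set
def pvBucket (lows : List String) (m : List (String × List String))
    (seen : PySem.Set String) : List String :=
  (List.range lows.length).flatMap (fun i =>
    m.flatMap (fun kv => if pvIdx lows kv.1 = some i ∧ pvLive seen kv then kv.2 else []))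

theorem pvFlatMap_congr {α β : Type} (l : List α) (f g : α → List β)
    (h : ∀ x ∈ l, f x = g x) : l.flatMap f = l.flatMap g := by
  induction l with
  | nil => rfl
  | cons x xs ih =>
    simp only [List.flatMap_cons, h x (by simp),
      ih (fun y hy => h y (by simp [hy]))]

theorem pvFoldl_step (cs : List String) : ∀ (tags : List String) (seen : PySem.Set String),
    cs.foldl pvStep (tags, seen) = (tags ++ pvDGo seen cs, PySem.Set.update seen cs) := by
  induction cs with
  | nil => intro tags seen; simp [pvDGo, PySem.Set.update]
  | cons x xs ih =>
    intro tags seen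
    by_cases h : x ∈ seen
    · have hadd : PySem.Set.add seen x = seen := by simp [PySem.Set.add, h]
      simp [pvStep, pvDGo, h, PySem.Set.update, List.foldl_cons, ih]
    · simp [pvStep, pvDGo, h, PySem.Set.update, List.foldl_cons, ih]

-- A's inner double loop over the map equals a fold of pvStep over the flattened candidates
theorem pvInner_flat (c : String → Bool) (m : List (String × List String)) :
    ∀ (st : List String × PySem.Set String),
    m.foldl (fun st kv => if c kv.1 then kv.2.foldl pvStep st else st) st
      = (m.flatMap (fun kv => if c kv.1 then kv.2 else [])).foldl pvStep st := by
  induction m with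
  | nil => intro st; simp
  | cons kv rest ih =>
    intro st
    by_cases h : c kv.1 = true
    · simp [h, List.foldl_append, ih]
    · have h' : c kv.1 = false := by simpa using h
      simp [h', ih]

-- A's whole nested loop = relative dedup of the flattened candidate stream
theorem pvA_flat (techs : List String) :
    get_tags_for_tech techs
      = pvDGo PySem.Set.empty
          ((techs.map (fun t => PySem.Str.strip (PySem.Str.lower t))).flatMap
            (fun low => pvM0 techTagMap low)) := by
  have houter : ∀ (st : List String × PySem.Set String),
      techs.foldl
        (fun (st : List String × PySem.Set String) tech =>
          techTagMap.foldl
            (fun st kv =>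
              if PySem.Str.isIn kv.1 (PySem.Str.strip (PySem.Str.lower tech)) then
                kv.2.foldl pvStep st
              else st) st) st
      = ((techs.map (fun t => PySem.Str.strip (PySem.Str.lower t))).flatMap
          (fun low => pvM0 techTagMap low)).foldl pvStep st := by
    induction techs with
    | nil => intro st; simp
    | cons t rest ih =>
      intro st
      simp only [List.map_cons, List.flatMap_cons, List.foldl_cons, List.foldl_append, ih,
        pvInner_flat (fun k => PySem.Str.isIn k (PySem.Str.strip (PySem.Str.lower t)))
          techTagMap st, pvM0]
  show (techs.foldl _ ([], PySem.Set.empty)).1 = _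
  rw [show (techs.foldl
      (fun (st : List String × PySem.Set String) tech =>
        let tech_lower := PySem.Str.strip (PySem.Str.lower tech)
        techTagMap.foldl
          (fun st kv =>
            if PySem.Str.isIn kv.1 tech_lower then
              kv.2.foldl
                (fun st tag =>
                  if PySem.Set.contains st.2 tag then st
                  else (st.1 ++ [tag], PySem.Set.add st.2 tag)) st
            else st) st)
      ([], PySem.Set.empty))
      = (techs.foldl
      (fun (st : List String × PySem.Set String) tech =>
        techTagMap.foldl
          (fun st kv =>
            if PySem.Str.isIn kv.1 (PySem.Str.strip (PySem.Str.lower tech)) then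
              kv.2.foldl pvStep st
            else st) st)
      ([], PySem.Set.empty)) from rfl]
  rw [houter, pvFoldl_step]
  simp

theorem pvDGo_append (a : List String) : ∀ (b : List String) (seen : PySem.Set String),
    pvDGo seen (a ++ b) = pvDGo seen a ++ pvDGo (PySem.Set.update seen a) b := by
  induction a with
  | nil => intro b seen; simp [pvDGo, PySem.Set.update]
  | cons x a' ih =>
    intro b seen
    by_cases h : x ∈ seen
    · have hadd : PySem.Set.add seen x = seen := by simp [PySem.Set.add, h]
      simp [pvDGo, h, PySem.Set.update, List.foldl_cons, ih]
    · simp [pvDGo, h, PySem.Set.update, List.foldl_cons, ih]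

theorem pvDGo_all_mem (l : List String) : ∀ (seen : PySem.Set String),
    (∀ x ∈ l, x ∈ seen) → pvDGo seen l = [] := by
  induction l with
  | nil => intro seen _; rfl
  | cons x xs ih =>
    intro seen h
    have hx : x ∈ seen := h x (by simp)
    simp [pvDGo, hx, ih seen (fun y hy => h y (by simp [hy]))]

theorem pvDGo_fresh (l : List String) : ∀ (seen : PySem.Set String),
    l.Nodup → (∀ x ∈ l, x ∉ seen) → pvDGo seen l = l := by
  induction l with
  | nil => intro seen _ _; rfl
  | cons x xs ih =>
    intro seen hnd h
    have hx : x ∉ seen := h x (by simp)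
    have hxs : ∀ y ∈ xs, y ∉ PySem.Set.add seen x := by
      intro y hy hmem
      rcases (PySem.Set.mem_add _ _ _).mp hmem with hs | he
      · exact h y (by simp [hy]) hs
      · exact (List.nodup_cons.mp hnd).1 (he ▸ hy)
    rw [pvDGo, if_neg (by simpa using hx), ih _ (List.nodup_cons.mp hnd).2 hxs]

theorem pvUpdate_all_mem (l : List String) : ∀ (seen : PySem.Set String),
    (∀ x ∈ l, x ∈ seen) → PySem.Set.update seen l = seen := by
  induction l with
  | nil => intro seen _; rfl
  | cons x xs ih =>
    intro seen h
    have hadd : PySem.Set.add seen x = seen := by simp [PySem.Set.add, h x (by simp)]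
    simp only [PySem.Set.update, List.foldl_cons] at *
    rw [hadd, ih seen (fun y hy => h y (by simp [hy]))]

-- with globally distinct tags, a tag of an entry occurs in no other entry
theorem pvUnique (m : List (String × List String)) (hm : pvFlatNodup m)
    {kv kv' : String × List String} (h1 : kv ∈ m) (h2 : kv' ∈ m)
    {t : String} (ht : t ∈ kv.2) (ht' : t ∈ kv'.2) : kv = kv' := by
  induction m with
  | nil => cases h1
  | cons a rest ih =>
    have hm' : (a.2 ++ rest.flatMap (fun kv => kv.2)).Nodup := by
      simpa [pvFlatNodup] using hm
    have hdisj := List.disjoint_of_nodup_append hm'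
    rcases List.mem_cons.mp h1 with rfl | h1' <;> rcases List.mem_cons.mp h2 with rfl | h2'
    · rfl
    · exact absurd (List.mem_flatMap.mpr ⟨kv', h2', ht'⟩) (fun hc => hdisj ht hc)
    · exact absurd (List.mem_flatMap.mpr ⟨kv, h1', ht⟩) (fun hc => hdisj ht' hc)
    · exact ih (List.Nodup.of_append_right hm') h1' h2'

theorem pvMem_M0 (m : List (String × List String)) (low t : String) :
    t ∈ pvM0 m low ↔ ∃ kv ∈ m, PySem.Str.isIn kv.1 low = true ∧ t ∈ kv.2 := by
  simp only [pvM0, List.mem_flatMap]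
  constructor
  · rintro ⟨kv, hkv, hmem⟩
    by_cases hc : PySem.Str.isIn kv.1 low = true
    · rw [if_pos hc] at hmem
      exact ⟨kv, hkv, hc, hmem⟩
    · rw [if_neg hc] at hmem
      cases hmem
  · rintro ⟨kv, hkv, hc, hmem⟩
    exact ⟨kv, hkv, by rw [if_pos hc]; exact hmem⟩

-- tags of an UNMATCHED entry never occur in the candidate block of this technology
theorem pvNot_mem_M0 (m : List (String × List String)) (hm : pvFlatNodup m)
    {kv : String × List String} (hkv : kv ∈ m) {t : String} (ht : t ∈ kv.2) (low : String)
    (hc : ¬ PySem.Str.isIn kv.1 low = true) : t ∉ pvM0 m low := by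
  intro hmem
  rcases (pvMem_M0 m low t).mp hmem with ⟨kv', hkv', hc', ht'⟩
  exact hc (pvUnique m hm hkv hkv' ht ht' ▸ hc')

-- relative dedup of one technology's candidate block keeps exactly the live matched entries
theorem pvDGo_M0 (m : List (String × List String)) (hm : pvFlatNodup m) (low : String) :
    ∀ (seen : PySem.Set String), pvUniform seen m →
    pvDGo seen (pvM0 m low)
      = m.flatMap (fun kv =>
          if PySem.Str.isIn kv.1 low = true ∧ pvLive seen kv then kv.2 else []) := by
  induction m with
  | nil => intro seen _; rfl
  | cons kv rest ih =>
    intro seen hu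
    have hm' : (kv.2 ++ rest.flatMap (fun kv => kv.2)).Nodup := by
      simpa [pvFlatNodup] using hm
    have hrest : pvFlatNodup rest := List.Nodup.of_append_right hm'
    have hdisj := List.disjoint_of_nodup_append hm'
    have hurest : pvUniform seen rest := fun kv' h => hu kv' (by simp [h])
    have hM0cons : pvM0 (kv :: rest) low
        = (if PySem.Str.isIn kv.1 low = true then kv.2 else []) ++ pvM0 rest low := by
      simp [pvM0]
    by_cases hc : PySem.Str.isIn kv.1 low = true
    · rcases hu kv (by simp) with hdead | hlive
      · -- entry already fully seen: contributes nothing new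
        have h1 : pvDGo seen kv.2 = [] := pvDGo_all_mem kv.2 seen hdead
        have h2 : PySem.Set.update seen kv.2 = seen := pvUpdate_all_mem kv.2 seen hdead
        have hhead : (if PySem.Str.isIn kv.1 low = true ∧ pvLive seen kv then kv.2 else [])
            = ([] : List String) := by
          by_cases hC : PySem.Str.isIn kv.1 low = true ∧ pvLive seen kv
          · rw [if_pos hC]
            exact List.eq_nil_iff_forall_not_mem.mpr (fun t ht => hC.2 t ht (hdead t ht))
          · rw [if_neg hC]
        rw [hM0cons, pvDGo_append, if_pos hc, h1, h2, List.flatMap_cons, hhead,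
          List.nil_append, List.nil_append, ih hrest seen hurest]
      · -- live matched entry: its tags are emitted, then become seen
        have hknd : kv.2.Nodup := List.Nodup.of_append_left hm'
        have h1 : pvDGo seen kv.2 = kv.2 := pvDGo_fresh kv.2 seen hknd hlive
        have hurest' : pvUniform (PySem.Set.update seen kv.2) rest := by
          intro kv' hkv'
          have hnotin : ∀ t ∈ kv'.2, t ∉ kv.2 := fun t ht' htk =>
            hdisj htk (List.mem_flatMap.mpr ⟨kv', hkv', ht'⟩)
          rcases hurest kv' hkv' with hd | hl
          · exact Or.inl fun t ht => (PySem.Set.mem_update _ _ _).mpr (Or.inl (hd t ht))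
          · refine Or.inr fun t ht hmem => ?_
            rcases (PySem.Set.mem_update _ _ _).mp hmem with h | h
            · exact hl t ht h
            · exact hnotin t ht h
        have hcong : rest.flatMap (fun kv' =>
              if PySem.Str.isIn kv'.1 low = true ∧ pvLive (PySem.Set.update seen kv.2) kv'
              then kv'.2 else [])
            = rest.flatMap (fun kv' =>
              if PySem.Str.isIn kv'.1 low = true ∧ pvLive seen kv' then kv'.2 else []) := by
          apply pvFlatMap_congr
          intro kv' hkv'
          have hnotin : ∀ t ∈ kv'.2, t ∉ kv.2 := fun t ht' htk =>
            hdisj htk (List.mem_flatMap.mpr ⟨kv', hkv', ht'⟩)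
          have : pvLive (PySem.Set.update seen kv.2) kv' ↔ pvLive seen kv' := by
            constructor
            · intro hl t ht hmem
              exact hl t ht ((PySem.Set.mem_update _ _ _).mpr (Or.inl hmem))
            · intro hl t ht hmem
              rcases (PySem.Set.mem_update _ _ _).mp hmem with h | h
              · exact hl t ht h
              · exact hnotin t ht h
          simp [this]
        rw [hM0cons, pvDGo_append, if_pos hc, h1, List.flatMap_cons,
          if_pos ⟨hc, hlive⟩, ih hrest _ hurest', hcong]
    · -- unmatched entry contributes nothing
      rw [hM0cons, if_neg hc, List.nil_append, List.flatMap_cons, if_neg (fun h => hc h.1),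
        List.nil_append, ih hrest seen hurest]

-- MAIN: relative dedup of the whole candidate stream = first-match-index bucketing
theorem pvMain (m : List (String × List String)) (hm : pvFlatNodup m) :
    ∀ (lows : List String) (seen : PySem.Set String), pvUniform seen m →
    pvDGo seen (lows.flatMap (fun low => pvM0 m low)) = pvBucket lows m seen := by
  intro lows
  induction lows with
  | nil => intro seen _; simp [pvBucket, pvDGo]
  | cons l0 ls ih =>
    intro seen hu
    have hseen' : ∀ kv ∈ m, PySem.Str.isIn kv.1 l0 = true → ∀ t ∈ kv.2,
        t ∈ PySem.Set.update seen (pvM0 m l0) := by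
      intro kv hkv hc t ht
      exact (PySem.Set.mem_update _ _ _).mpr
        (Or.inr ((pvMem_M0 m l0 t).mpr ⟨kv, hkv, hc, ht⟩))
    have hlive' : ∀ kv ∈ m, ¬ PySem.Str.isIn kv.1 l0 = true →
        (pvLive (PySem.Set.update seen (pvM0 m l0)) kv ↔ pvLive seen kv) := by
      intro kv hkv hc
      constructor
      · intro hl t ht hmem
        exact hl t ht ((PySem.Set.mem_update _ _ _).mpr (Or.inl hmem))
      · intro hl t ht hmem
        rcases (PySem.Set.mem_update _ _ _).mp hmem with h | h
        · exact hl t ht h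
        · exact pvNot_mem_M0 m hm hkv ht l0 hc h
    have hu' : pvUniform (PySem.Set.update seen (pvM0 m l0)) m := by
      intro kv hkv
      by_cases hc : PySem.Str.isIn kv.1 l0 = true
      · exact Or.inl (hseen' kv hkv hc)
      · rcases hu kv hkv with hd | hl
        · exact Or.inl fun t ht => (PySem.Set.mem_update _ _ _).mpr (Or.inl (hd t ht))
        · exact Or.inr ((hlive' kv hkv hc).mpr hl)
    have hidx0 : ∀ (kv : String × List String),
        (pvIdx (l0 :: ls) kv.1 = some 0) ↔ PySem.Str.isIn kv.1 l0 = true := by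
      intro kv
      simp only [pvIdx, List.findIdx?_cons]
      by_cases hc : PySem.Str.isIn kv.1 l0 = true
      · have hcc : PySem.Chars.isIn kv.1.toList l0.toList = true := hc
        simp [hc, hcc]
      · have hcc : PySem.Chars.isIn kv.1.toList l0.toList = false :=
          Bool.eq_false_iff.mpr (fun h => hc h)
        cases h : ls.findIdx? (fun low => PySem.Str.isIn kv.1 low) <;>
          simp [hc, hcc, h, Bool.eq_false_iff]
    have hidxS : ∀ (kv : String × List String) (i : Nat),
        (pvIdx (l0 :: ls) kv.1 = some (i + 1))
          ↔ (¬ PySem.Str.isIn kv.1 l0 = true ∧ pvIdx ls kv.1 = some i) := by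
      intro kv i
      simp only [pvIdx, List.findIdx?_cons]
      by_cases hc : PySem.Str.isIn kv.1 l0 = true
      · have hcc : PySem.Chars.isIn kv.1.toList l0.toList = true := hc
        simp [hc, hcc]
      · have hcc : PySem.Chars.isIn kv.1.toList l0.toList = false :=
          Bool.eq_false_iff.mpr (fun h => hc h)
        cases h : ls.findIdx? (fun low => PySem.Str.isIn kv.1 low) with
        | none => simp [hc, hcc, h, Bool.eq_false_iff]
        | some j => simp [hc, hcc, h, Bool.eq_false_iff]
    calc pvDGo seen ((l0 :: ls).flatMap (fun low => pvM0 m low))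
        = pvDGo seen (pvM0 m l0) ++
            pvDGo (PySem.Set.update seen (pvM0 m l0)) (ls.flatMap (fun low => pvM0 m low)) := by
          rw [List.flatMap_cons, pvDGo_append]
      _ = m.flatMap (fun kv =>
            if PySem.Str.isIn kv.1 l0 = true ∧ pvLive seen kv then kv.2 else []) ++
          pvBucket ls m (PySem.Set.update seen (pvM0 m l0)) := by
          rw [pvDGo_M0 m hm l0 seen hu, ih _ hu']
      _ = pvBucket (l0 :: ls) m seen := by
          simp only [pvBucket, List.length_cons, List.range_succ_eq_map,
            List.flatMap_cons, List.flatMap_map]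
          congr 1
          · apply pvFlatMap_congr
            intro kv _
            exact if_congr (and_congr_left' (hidx0 kv).symm) rfl rfl
          · apply pvFlatMap_congr
            intro i _
            apply pvFlatMap_congr
            intro kv hkv
            by_cases hc : PySem.Str.isIn kv.1 l0 = true
            · -- matched entry: dead for the tail on both sides (unless it has no tags)
              by_cases hL : pvLive (PySem.Set.update seen (pvM0 m l0)) kv
              · have hnil : kv.2 = [] := List.eq_nil_iff_forall_not_mem.mpr
                  (fun t ht => (hL t ht (hseen' kv hkv hc t ht)).elim)
                simp [hnil]
              · rw [if_neg (fun h => hL h.2),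
                  if_neg (fun h => ((hidxS kv i).mp h.1).1 hc)]
            · have hlv := hlive' kv hkv hc
              by_cases hI : pvIdx ls kv.1 = some i
              · by_cases hL : pvLive seen kv
                · rw [if_pos ⟨hI, hlv.mpr hL⟩,
                    if_pos ⟨(hidxS kv i).mpr ⟨hc, hI⟩, hL⟩]
                · rw [if_neg (fun h => hL (hlv.mp h.2)), if_neg (fun h => hL h.2)]
              · rw [if_neg (fun h => hI h.1),
                  if_neg (fun h => hI ((hidxS kv i).mp h.1).2)]

-- ===== B-side characterisation =====

theorem pvFirstLoop_eq (key : String) (lows : List String) :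
    ∀ (s : Int) (d : PySem.Dict String Int),
    firstLoop key (PySem.List.enumerate lows s) d
      = match pvIdx lows key with
        | some n => d.insert key (s + (n : Int))
        | none => d := by
  induction lows with
  | nil => intro s d; simp [PySem.List.enumerate_nil, firstLoop, pvIdx]
  | cons l0 ls ih =>
    intro s d
    rw [PySem.List.enumerate_cons]
    by_cases hc : PySem.Str.isIn key l0 = true
    · have hcc : PySem.Chars.isIn key.toList l0.toList = true := hc
      simp [firstLoop, hcc, pvIdx, List.findIdx?_cons]
    · show (if PySem.Str.isIn key l0 = true then d.insert key s
          else firstLoop key (PySem.List.enumerate ls (s + 1)) d) = _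
      rw [if_neg hc, ih (s + 1) d,
        show pvIdx (l0 :: ls) key = (pvIdx ls key).map (fun i => i + 1) by
          simp only [pvIdx, List.findIdx?_cons]; rw [if_neg hc]]
      cases h : pvIdx ls key with
      | none => rfl
      | some n =>
        show d.insert key (s + 1 + (n : Int)) = d.insert key (s + ((n + 1 : Nat) : Int))
        congr 1
        push_cast
        ring

def pvFoldFirst (lows : List String) (m : List (String × List String))
    (d : PySem.Dict String Int) : PySem.Dict String Int :=
  m.foldl (fun d kv => firstLoop kv.1 (PySem.List.enumerate lows) d) d

theorem pvFoldFirst_untouched (lows : List String) (m : List (String × List String)) :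
    ∀ (d : PySem.Dict String Int) (k : String), k ∉ m.map (fun kv => kv.1) →
    (pvFoldFirst lows m d).get? k = d.get? k := by
  induction m with
  | nil => intro d k _; rfl
  | cons kv rest ih =>
    intro d k hk
    have hne : k ≠ kv.1 := fun he => hk (by simp [he])
    have hk' : k ∉ rest.map (fun kv => kv.1) := fun hm => hk (by simp [List.mem_map] at hm ⊢; tauto)
    show (pvFoldFirst lows rest (firstLoop kv.1 (PySem.List.enumerate lows) d)).get? k = _
    rw [ih _ k hk', pvFirstLoop_eq]
    cases pvIdx lows kv.1 with
    | none => rfl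
    | some n => exact PySem.Dict.get?_insert_of_ne _ _ hne

theorem pvFoldFirst_get (lows : List String) (m : List (String × List String)) :
    ∀ (d : PySem.Dict String Int) (k : String), (m.map (fun kv => kv.1)).Nodup →
    k ∈ m.map (fun kv => kv.1) →
    (pvFoldFirst lows m d).get? k
      = match pvIdx lows k with
        | some n => some ((n : Int))
        | none => d.get? k := by
  induction m with
  | nil => intro d k _ hk; cases hk
  | cons kv rest ih =>
    intro d k hnd hk
    have hnd' : (rest.map (fun kv => kv.1)).Nodup := (List.nodup_cons.mp hnd).2
    by_cases he : k = kv.1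
    · have hkr : k ∉ rest.map (fun kv => kv.1) := he ▸ (List.nodup_cons.mp hnd).1
      show (pvFoldFirst lows rest (firstLoop kv.1 (PySem.List.enumerate lows) d)).get? k = _
      rw [pvFoldFirst_untouched lows rest _ k hkr, pvFirstLoop_eq, he]
      cases pvIdx lows kv.1 with
      | none => rfl
      | some n => simp [PySem.Dict.get?_insert_self]
    · have hkr : k ∈ rest.map (fun kv => kv.1) := by
        simp at hk
        rcases hk with h | h
        · exact absurd h he
        · simpa using h
      show (pvFoldFirst lows rest (firstLoop kv.1 (PySem.List.enumerate lows) d)).get? k = _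
      rw [ih _ k hnd' hkr, pvFirstLoop_eq]
      cases pvIdx lows kv.1 with
      | none => rfl
      | some n =>
        cases pvIdx lows k with
        | none => exact PySem.Dict.get?_insert_of_ne _ _ he
        | some j => rfl

theorem pvB_eq (techs : List String) :
    get_tags_for_tech_alt techs
      = pvBucket (techs.map (fun t => PySem.Str.strip (PySem.Str.lower t)))
          techTagMap PySem.Set.empty := by
  have hnd : (techTagMap.map (fun kv => kv.1)).Nodup := by decide
  show (PySem.List.pyRange 0
        (PySem.List.len (techs.map (fun t => PySem.Str.strip (PySem.Str.lower t)))) 1).flatMap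
      (fun i => techTagMap.flatMap (fun kv =>
        if (pvFoldFirst (techs.map (fun t => PySem.Str.strip (PySem.Str.lower t)))
              techTagMap PySem.Dict.empty).get? kv.1 = some i
        then kv.2 else [])) = _
  set lows := techs.map (fun t => PySem.Str.strip (PySem.Str.lower t)) with hlows
  have hget : ∀ kv ∈ techTagMap,
      (pvFoldFirst lows techTagMap PySem.Dict.empty).get? kv.1
        = match pvIdx lows kv.1 with
          | some n => some ((n : Int))
          | none => none := by
    intro kv hkv
    rw [pvFoldFirst_get lows techTagMap PySem.Dict.empty kv.1 hnd
      (List.mem_map.mpr ⟨kv, hkv, rfl⟩)]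
    cases pvIdx lows kv.1 with
    | none => simp [PySem.Dict.get?_empty]
    | some n => rfl
  rw [PySem.List.len_eq, PySem.List.pyRange_zero_natCast, List.flatMap_map]
  unfold pvBucket
  apply pvFlatMap_congr
  intro i _
  apply pvFlatMap_congr
  intro kv hkv
  have hl : pvLive PySem.Set.empty kv := by intro t _ h; simp [PySem.Set.empty] at h
  rw [hget kv hkv]
  cases h : pvIdx lows kv.1 with
  | none =>
    rw [if_neg (fun hx => by exact nomatch hx),
      if_neg (fun hx => by exact nomatch hx.1)]
  | some n =>
    by_cases hni : n = i
    · subst hni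
      rw [if_pos rfl, if_pos ⟨rfl, hl⟩]
    · rw [if_neg (fun hx => hni (Int.natCast_inj.mp (Option.some.inj hx))),
        if_neg (fun hx => hni (Option.some.inj hx.1))]

-- ===== VERDICT (by name: the statement is the Claim_ definition above) =====
theorem get_tags_for_tech_spec : Claim_equal_get_tags_for_tech := by
  intro technologies _
  show get_tags_for_tech technologies = get_tags_for_tech_alt technologies
  have hm : pvFlatNodup techTagMap := by decide
  have hu : pvUniform PySem.Set.empty techTagMap := by
    intro kv _
    exact Or.inr (fun t _ h => by simp [PySem.Set.empty] at h)
  rw [pvA_flat, pvB_eq,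
    pvMain techTagMap hm (technologies.map (fun t => PySem.Str.strip (PySem.Str.lower t)))
      PySem.Set.empty hu]
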